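-- pv_equiv track=rewrite | github.com/vaidehidubey122005/Misson_DSA | hackerrank/waiter.py | waiter
-- ===== SOURCE A (Python) =====
-- def waiter(plates, num_set):
--     # Stack for final order of plates
--     served = []
--
--     # Stack 1 is the original plates stack
--     stack1 = plates
--     stack2 = []
--
--     # For each number in num_set, process the plates and serve
--     for num in num_set:
--         # Move plates from stack1 to stack2, keeping only the ones equal to num in stack1
--         temp_stack = []
--
--         # Move plates that are not equal to num to stack2
--         for plate in stack1:
--             if plate == num:
--                 served.append(plate)  # Serve the plate
--             else:
--                 temp_stack.append(plate)
--
--         # After processing the current number, stack1 becomes temp_stack (plates not served)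
--         stack1 = temp_stack
--
--     # Now, serve the remaining plates that are not removed
--     served += stack1
--
--     return served
-- ===== SOURCE B (Python) =====
-- def waiter(plates, num_set):
--     # One-pass bucketing: plates are grouped by first-occurrence order of their
--     # value in num_set, unmatched plates keep their order at the end.  O(n + m).
--     order = list(dict.fromkeys(num_set))      # distinct values, first-occurrence order
--     buckets = {num: [] for num in order}
--     leftovers = []
--     for plate in plates:
--         if plate in buckets:
--             buckets[plate].append(plate)
--         else:
--             leftovers.append(plate)
--     served = []
--     for bucket in buckets.values():
--         served += bucket
--     return served + leftovers
-- ===== Notes on version B (the rewrite author's own statement) =====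
-- stated objective: faster
-- what changed: Instead of rescanning the whole remaining plate stack once per number in num_set, B makes a single pass over plates, dropping each plate into a hash bucket keyed by the first-occurrence order of its value in num_set (or into a leftover list), and concatenates the buckets.
import Mathlib
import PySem

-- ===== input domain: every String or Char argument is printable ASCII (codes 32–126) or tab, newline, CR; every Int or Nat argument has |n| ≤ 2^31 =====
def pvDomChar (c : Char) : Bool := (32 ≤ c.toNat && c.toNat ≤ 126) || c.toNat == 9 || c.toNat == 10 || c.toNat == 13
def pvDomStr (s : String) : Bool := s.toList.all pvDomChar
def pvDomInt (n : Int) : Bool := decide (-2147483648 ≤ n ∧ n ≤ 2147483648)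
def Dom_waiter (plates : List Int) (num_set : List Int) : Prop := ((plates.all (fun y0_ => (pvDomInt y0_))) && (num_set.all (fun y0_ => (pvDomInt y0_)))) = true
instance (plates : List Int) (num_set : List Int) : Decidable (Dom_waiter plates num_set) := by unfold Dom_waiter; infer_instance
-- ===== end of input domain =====

-- B replaces A's per-number rescan of the remaining plates by one-pass bucketing keyed
-- by first-occurrence order in num_set (objective: faster; proof: same return value).


-- ===== PORT A =====
-- outer fold state: (served, stack1); inner loop over stack1 rebuilds (served, temp_stack)
def waiter (plates : List Int) (num_set : List Int) : List Int :=
  let st := num_set.foldl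
    (fun (st : List Int × List Int) num =>
      st.2.foldl
        (fun (p : List Int × List Int) plate =>
          if plate == num then (p.1 ++ [plate], p.2) else (p.1, p.2 ++ [plate]))
        (st.1, []))
    (([] : List Int), plates)
  st.1 ++ st.2

-- ===== PORT B =====
-- order = list(dict.fromkeys(num_set)); buckets = {num: [] for num in order};
-- one pass over plates appending into buckets / leftovers; then concatenate buckets.values()
def waiter_alt (plates : List Int) (num_set : List Int) : List Int :=
  let order := PySem.List.dedup num_set
  let buckets := order.foldl (fun (d : PySem.Dict Int (List Int)) num => d.insert num []) PySem.Dict.empty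
  let st := plates.foldl
    (fun (s : PySem.Dict Int (List Int) × List Int) plate =>
      if s.1.contains plate then (s.1.modify plate [] (fun b => b ++ [plate]), s.2)
      else (s.1, s.2 ++ [plate]))
    (buckets, ([] : List Int))
  let served := st.1.values.foldl (fun acc b => acc ++ b) []
  served ++ st.2

-- ===== PRECONDITION & SPEC =====
def Spec_waiter (plates : List Int) (num_set : List Int) (out : List Int) : Prop := out = waiter_alt plates num_set
instance (plates : List Int) (num_set : List Int) (out : List Int) : Decidable (Spec_waiter plates num_set out) := by unfold Spec_waiter; infer_instance

-- ===== CLAIM (what is proved, stated in full; the proofs are below) =====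
def Claim_equal_waiter : Prop := ∀ (plates : List Int) (num_set : List Int), Dom_waiter plates num_set → Spec_waiter plates num_set (waiter plates num_set)

-- ===== LEMMAS AND PROOFS =====

-- canonical recursion: serve all plates equal to the first number, recurse on the rest
def serveRec : List Int → List Int → List Int
  | [], s => s
  | n :: ns, s => s.filter (· == n) ++ serveRec ns (s.filter (fun x => !(x == n)))

-- A's inner loop is a partition of stack1 by (== num)
lemma waiter_inner (xs : List Int) (num : Int) (srv tmp : List Int) :
    xs.foldl (fun (p : List Int × List Int) plate =>
        if plate == num then (p.1 ++ [plate], p.2) else (p.1, p.2 ++ [plate])) (srv, tmp)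
    = (srv ++ xs.filter (· == num), tmp ++ xs.filter (fun x => !(x == num))) := by
  induction xs generalizing srv tmp with
  | nil => simp
  | cons x xs ih =>
    simp only [List.foldl_cons, List.filter_cons]
    cases hx : x == num
    · simp only [Bool.false_eq_true, if_false, Bool.not_false, if_true, ih]
      simp
    · simp only [if_true, Bool.not_true, Bool.false_eq_true, if_false, ih]
      simp

-- A's outer loop computes serveRec
lemma waiter_outer (ns : List Int) (srv s : List Int) :
    (List.foldl (fun (st : List Int × List Int) num =>
        st.2.foldl (fun (p : List Int × List Int) plate =>
          if plate == num then (p.1 ++ [plate], p.2) else (p.1, p.2 ++ [plate])) (st.1, []))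
      (srv, s) ns).1
    ++ (List.foldl (fun (st : List Int × List Int) num =>
        st.2.foldl (fun (p : List Int × List Int) plate =>
          if plate == num then (p.1 ++ [plate], p.2) else (p.1, p.2 ++ [plate])) (st.1, []))
      (srv, s) ns).2 = srv ++ serveRec ns s := by
  induction ns generalizing srv s with
  | nil => simp [serveRec]
  | cons n ns ih =>
    simp only [List.foldl_cons]
    rw [waiter_inner s n srv []]
    rw [List.nil_append, ih]
    simp [serveRec]

lemma waiter_eq_serveRec (plates ns : List Int) : waiter plates ns = serveRec ns plates := by
  have h := waiter_outer ns [] plates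
  rw [List.nil_append] at h
  exact h

-- dropping later repeats of a number absent from the plates does not change serveRec
lemma serveRec_filter (ns : List Int) (n : Int) (t : List Int) (h : n ∉ t) :
    serveRec ns t = serveRec (ns.filter (fun x => !(x == n))) t := by
  induction ns generalizing t with
  | nil => rfl
  | cons m ns ih =>
    simp only [List.filter_cons]
    by_cases hm : m = n
    · subst hm
      simp only [beq_self_eq_true, Bool.not_true, Bool.false_eq_true, if_false]
      have h1 : t.filter (· == m) = [] := by
        rw [List.filter_eq_nil_iff]
        intro a ha
        simp only [beq_iff_eq]
        intro he; exact h (he ▸ ha)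
      have h2 : t.filter (fun x => !(x == m)) = t := by
        rw [List.filter_eq_self]
        intro a ha
        simp only [Bool.not_eq_eq_eq_not, Bool.not_true, beq_eq_false_iff_ne, ne_eq]
        intro he; exact h (he ▸ ha)
      rw [serveRec, h1, h2, List.nil_append]
      exact ih t h
    · have hb : (m == n) = false := by simp [hm]
      simp only [hb, Bool.not_false, if_true]
      rw [serveRec, serveRec]
      congr 1
      apply ih
      simp only [List.mem_filter, Bool.not_eq_eq_eq_not, Bool.not_true, beq_eq_false_iff_ne, ne_eq]
      intro ⟨hnt, _⟩; exact h hnt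

-- PySem.Set.ofList (= dict.fromkeys) extended below a pinned head
lemma foldl_add_cons (ns : List Int) (n : Int) (ks : List Int) :
    ns.foldl PySem.Set.add (n :: ks) = n :: (ns.filter (fun x => !(x == n))).foldl PySem.Set.add ks := by
  induction ns generalizing ks with
  | nil => rfl
  | cons x ns ih =>
    simp only [List.foldl_cons, List.filter_cons]
    by_cases hx : x = n
    · subst hx
      have : PySem.Set.add (x :: ks) x = x :: ks := by
        simp [PySem.Set.add, PySem.Set.contains]
      rw [this]
      simp [ih]
    · have hb : (x == n) = false := by simp [hx]
      have : PySem.Set.add (n :: ks) x = n :: PySem.Set.add ks x := by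
        simp only [PySem.Set.add, PySem.Set.contains, List.contains_cons, hb,
          Bool.false_or, List.cons_append]
        split <;> rfl
      rw [this, hb]
      simp only [Bool.not_false, if_true, List.foldl_cons]
      exact ih _

lemma dedup_cons (n : Int) (ns : List Int) :
    PySem.List.dedup (n :: ns) = n :: PySem.List.dedup (ns.filter (fun x => !(x == n))) := by
  show (n :: ns).foldl PySem.Set.add PySem.Set.empty = _
  rw [List.foldl_cons]
  have : PySem.Set.add PySem.Set.empty n = [n] := rfl
  rw [this, foldl_add_cons]
  rfl

-- bridge: serveRec is bucket-concatenation over the deduplicated numbers plus leftovers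
lemma serveRec_eq_buckets (ns s : List Int) :
    serveRec ns s
    = (PySem.List.dedup ns).flatMap (fun k => s.filter (· == k))
      ++ s.filter (fun p => !((PySem.List.dedup ns).contains p)) := by
  induction hn : ns.length using Nat.strong_induction_on generalizing ns s with
  | _ len ih =>
  cases ns with
  | nil =>
    simp [serveRec, PySem.List.dedup, PySem.Set.ofList]
  | cons n ns' =>
    subst hn
    have hlt : (ns'.filter (fun x => !(x == n))).length < (n :: ns').length :=
      Nat.lt_succ_of_le (List.length_filter_le _ _)
    rw [serveRec, dedup_cons]
    rw [serveRec_filter ns' n (s.filter (fun x => !(x == n))) (by simp)]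
    rw [ih _ hlt _ _ rfl]
    rw [List.flatMap_cons, List.append_assoc]
    congr 1
    congr 1
    · apply List.flatMap_congr
      intro k hk
      have hkn : ¬ k = n := by
        have : k ∈ ns'.filter (fun x => !(x == n)) := (PySem.List.mem_dedup _ _).mp hk
        simp at this
        exact this.2
      rw [List.filter_filter]
      apply List.filter_congr
      intro x _
      by_cases hx : x = k
      · subst hx; simp [hkn]
      · simp [hx]
    · rw [List.filter_filter]
      apply List.filter_congr
      intro x _
      simp only [List.contains_cons]
      by_cases hx : x = n
      · subst hx; simp
      · simp [hx, Bool.and_comm]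

-- B: the first occurrence of a key in a key-tagged map is its entry
lemma find?_map_of_mem (ks : List Int) (g : Int → List Int) (p : Int) (hp : p ∈ ks) :
    List.find? (fun q => q.1 == p) (ks.map (fun k => (k, g k))) = some (p, g p) := by
  induction ks with
  | nil => simp at hp
  | cons k ks ih =>
    simp only [List.map_cons, List.find?_cons]
    by_cases hk : k = p
    · subst hk; simp
    · have hb : (k == p) = false := by simp [hk]
      simp only [hb]
      rcases List.mem_cons.mp hp with h | h
      · exact absurd h.symm hk
      · exact ih h

-- B: building the empty buckets dict over nodup keys
lemma buckets_init_gen (ks : List Int) (its : List (Int × List Int)) (hnd : ks.Nodup)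
    (h : ∀ k ∈ ks, ∀ q ∈ its, q.1 ≠ k) :
    (ks.foldl (fun (d : PySem.Dict Int (List Int)) num => d.insert num []) ⟨its⟩).items
    = its ++ ks.map (fun k => (k, ([] : List Int))) := by
  induction ks generalizing its with
  | nil => simp
  | cons k ks ih =>
    simp only [List.foldl_cons, List.map_cons]
    have hc : (PySem.Dict.mk its).contains k = false := by
      simp only [PySem.Dict.contains, List.any_eq_false]
      intro q hq
      simp [h k (by simp) q hq]
    have hins : (PySem.Dict.mk its).insert k [] = ⟨its ++ [(k, [])]⟩ := by
      simp [PySem.Dict.insert, hc]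
    rw [hins, ih (its ++ [(k, [])]) (List.Nodup.of_cons hnd)]
    · simp
    · intro k' hk' q hq
      rcases List.mem_append.mp hq with h1 | h1
      · exact h k' (by simp [hk']) q h1
      · simp at h1
        subst h1
        intro he
        apply (List.nodup_cons.mp hnd).1
        have : k = k' := he
        rwa [this]

-- B: the plate loop distributes the plates into the buckets and the leftovers
lemma buckets_fill (plates ks : List Int) (g : Int → List Int) (left : List Int) :
    plates.foldl
      (fun (s : PySem.Dict Int (List Int) × List Int) plate =>
        if s.1.contains plate then (s.1.modify plate [] (fun b => b ++ [plate]), s.2)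
        else (s.1, s.2 ++ [plate]))
      (⟨ks.map (fun k => (k, g k))⟩, left)
    = (⟨ks.map (fun k => (k, g k ++ plates.filter (· == k)))⟩,
       left ++ plates.filter (fun p => !(ks.contains p))) := by
  induction plates generalizing g left with
  | nil => simp
  | cons p rest ih =>
    simp only [List.foldl_cons]
    by_cases hp : p ∈ ks
    · have hc : (PySem.Dict.mk (ks.map (fun k => (k, g k)))).contains p = true := by
        simp only [PySem.Dict.contains, List.any_eq_true]
        exact ⟨(p, g p), List.mem_map.mpr ⟨p, hp, rfl⟩, by simp⟩
      have hget : (PySem.Dict.mk (ks.map (fun k => (k, g k)))).getD p [] = g p := by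
        simp [PySem.Dict.getD, PySem.Dict.get?, find?_map_of_mem ks g p hp]
      have hmod : (PySem.Dict.mk (ks.map (fun k => (k, g k)))).modify p [] (fun b => b ++ [p])
          = ⟨ks.map (fun k => (k, (fun k => if k = p then g p ++ [p] else g k) k))⟩ := by
        simp only [PySem.Dict.modify, hget, PySem.Dict.insert, hc, if_true, List.map_map]
        congr 1
        apply List.map_congr_left
        intro k _
        by_cases hk : k = p
        · subst hk; simp
        · simp [hk]
      rw [if_pos hc, hmod, ih]
      simp only [Prod.mk.injEq]
      constructor
      · congr 1
        apply List.map_congr_left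
        intro k hk
        by_cases hkp : k = p
        · subst hkp; simp
        · have hpk : ¬ p = k := fun h => hkp h.symm
          simp [hpk, hkp]
      · simp [hp]
    · have hc : (PySem.Dict.mk (ks.map (fun k => (k, g k)))).contains p = false := by
        simp only [PySem.Dict.contains, List.any_eq_false]
        intro q hq
        rcases List.mem_map.mp hq with ⟨k, hk, rfl⟩
        have hkp : ¬ k = p := fun he => hp (he ▸ hk)
        simp [hkp]
      rw [if_neg (by simp [hc]), ih]
      simp only [Prod.mk.injEq]
      constructor
      · congr 1
        apply List.map_congr_left
        intro k hk
        have hpk : ¬ p = k := fun he => hp (he ▸ hk)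
        simp [hpk]
      · simp [hp]

lemma waiter_alt_eq (plates ns : List Int) :
    waiter_alt plates ns
    = (PySem.List.dedup ns).flatMap (fun k => plates.filter (· == k))
      ++ plates.filter (fun p => !((PySem.List.dedup ns).contains p)) := by
  have hb : ((PySem.List.dedup ns).foldl
      (fun (d : PySem.Dict Int (List Int)) num => d.insert num []) PySem.Dict.empty)
      = ⟨(PySem.List.dedup ns).map (fun k => (k, ([] : List Int)))⟩ := by
    apply PySem.Dict.ext
    have := buckets_init_gen (PySem.List.dedup ns) [] (PySem.List.nodup_dedup ns) (by simp)
    simpa using this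
  have hfill := buckets_fill plates (PySem.List.dedup ns) (fun _ => []) []
  show ((plates.foldl
      (fun (s : PySem.Dict Int (List Int) × List Int) plate =>
        if s.1.contains plate then (s.1.modify plate [] (fun b => b ++ [plate]), s.2)
        else (s.1, s.2 ++ [plate]))
      ((PySem.List.dedup ns).foldl (fun (d : PySem.Dict Int (List Int)) num => d.insert num []) PySem.Dict.empty,
       ([] : List Int))).1.values.foldl (fun acc b => acc ++ b) [])
    ++ (plates.foldl
      (fun (s : PySem.Dict Int (List Int) × List Int) plate =>
        if s.1.contains plate then (s.1.modify plate [] (fun b => b ++ [plate]), s.2)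
        else (s.1, s.2 ++ [plate]))
      ((PySem.List.dedup ns).foldl (fun (d : PySem.Dict Int (List Int)) num => d.insert num []) PySem.Dict.empty,
       ([] : List Int))).2 = _
  rw [hb, hfill]
  simp only [PySem.Dict.values, List.map_map, List.nil_append]
  rw [PySem.List.foldl_append_eq_flatMap]
  simp [List.flatMap_map, Function.comp]

-- ===== VERDICT (by name: the statement is the Claim_ definition above) =====
theorem waiter_spec : Claim_equal_waiter := by
  intro plates ns _
  show waiter plates ns = waiter_alt plates ns
  rw [waiter_eq_serveRec, waiter_alt_eq, serveRec_eq_buckets]
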